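-- pv_equiv track=rewrite | github.com/Koubae/Algorithm-Complete-Guide | Algorithms/src/Sort-Algorithms/Maximum_difference_arr.py | create_pipes
-- ===== SOURCE A (Python) =====
-- def create_pipes(input_list):
--
--     max_pipe = list()
--     min_pipe = list()
--
--     while len(input_list) > 1:
--         # ---------------  Left Side Max Pipe
--         max_n = input_list.index(max(input_list))
--         max_pipe.append(input_list.pop(max_n))
--
--         # --------------- Right Side Min Pipe
--         min_n = input_list.index(min(input_list))
--         min_pipe.append(input_list.pop(min_n))
--     if input_list:
--         min_pipe.append(input_list.pop())
--     return max_pipe, min_pipe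
-- ===== SOURCE B (Python) =====
-- def create_pipes(input_list):
--     s = sorted(input_list)
--     k = (len(s) + 1) // 2
--     min_pipe = s[:k]
--     max_pipe = s[k:]
--     max_pipe.reverse()
--     input_list.clear()  # A pops every element out; keep the same observable mutation
--     return max_pipe, min_pipe
-- ===== Notes on version B (the rewrite author's own statement) =====
-- stated objective: faster
-- what changed: Replaces the quadratic repeated pop-max/pop-min scanning loop with a single sort followed by two slices (top half reversed, bottom half ascending).
import Mathlib
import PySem

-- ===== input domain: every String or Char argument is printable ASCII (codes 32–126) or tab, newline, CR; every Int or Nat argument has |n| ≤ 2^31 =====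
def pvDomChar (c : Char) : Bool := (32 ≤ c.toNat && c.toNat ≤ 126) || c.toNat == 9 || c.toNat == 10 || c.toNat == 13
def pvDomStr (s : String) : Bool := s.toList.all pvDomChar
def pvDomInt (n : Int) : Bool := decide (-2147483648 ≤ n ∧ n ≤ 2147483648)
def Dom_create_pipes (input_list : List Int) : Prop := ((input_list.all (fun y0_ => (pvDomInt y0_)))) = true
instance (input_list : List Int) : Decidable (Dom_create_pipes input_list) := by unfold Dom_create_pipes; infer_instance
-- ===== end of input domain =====

-- B replaces A's quadratic pop-max/pop-min loop with one sort plus two slices; like A's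
-- pops, B empties the caller's list (mutation noted; the theorems are about the return value).


-- ===== PORT A =====
-- the while-loop of A; fuel (= initial list length) only makes the recursion total,
-- each iteration pops two elements so it is never exhausted
def createPipesLoop : Nat → List Int → List Int → List Int → List Int × List Int
  | 0, _, maxp, minp => (maxp, minp)
  | fuel + 1, l, maxp, minp =>
    if 1 < l.length then
      -- max_n = input_list.index(max(input_list)); max_pipe.append(input_list.pop(max_n))
      let M := (PySem.List.max? l (fun x => x)).getD 0
      let maxN := (PySem.List.index? l M).getD 0
      match PySem.List.pop? l (maxN : Int) with
      | none => (maxp, minp)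
      | some (mv, l1) =>
        -- min_n = input_list.index(min(input_list)); min_pipe.append(input_list.pop(min_n))
        let m := (PySem.List.min? l1 (fun x => x)).getD 0
        let minN := (PySem.List.index? l1 m).getD 0
        match PySem.List.pop? l1 (minN : Int) with
        | none => (maxp ++ [mv], minp)
        | some (nv, l2) => createPipesLoop fuel l2 (maxp ++ [mv]) (minp ++ [nv])
    else
      -- if input_list: min_pipe.append(input_list.pop())
      if l ≠ [] then
        match PySem.List.pop? l (-1) with
        | none => (maxp, minp)
        | some (v, _) => (maxp, minp ++ [v])
      else (maxp, minp)

def create_pipes (input_list : List Int) : List Int × List Int :=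
  createPipesLoop input_list.length input_list [] []

-- ===== PORT B =====
def create_pipes_alt (input_list : List Int) : List Int × List Int :=
  let s := PySem.List.sorted input_list (fun x => x) false
  let k := PySem.Int.floordiv ((s.length : Int) + 1) 2
  let min_pipe := PySem.List.slice s none (some k)
  let max_pipe := PySem.List.slice s (some k) none
  (max_pipe.reverse, min_pipe)

-- ===== PRECONDITION & SPEC =====
def Spec_create_pipes (input_list : List Int) (out : List Int × List Int) : Prop := out = create_pipes_alt input_list
instance (input_list : List Int) (out : List Int × List Int) : Decidable (Spec_create_pipes input_list out) := by unfold Spec_create_pipes; infer_instance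

-- ===== CLAIM (what is proved, stated in full; the proofs are below) =====
def Claim_equal_create_pipes : Prop := ∀ (input_list : List Int), Dom_create_pipes input_list → Spec_create_pipes input_list (create_pipes input_list)

-- ===== LEMMAS AND PROOFS =====

-- the loop's closed form: top half of sorted(l) descending appended to maxp,
-- bottom half ascending appended to minp
theorem createPipesLoop_eq (fuel : Nat) : ∀ (l mp np : List Int), l.length ≤ fuel →
    createPipesLoop fuel l mp np =
      (mp ++ ((PySem.List.sorted l (fun x => x) false).drop ((l.length + 1) / 2)).reverse,
       np ++ (PySem.List.sorted l (fun x => x) false).take ((l.length + 1) / 2)) := by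
  induction fuel with
  | zero =>
    intro l mp np h
    have hl : l = [] := List.length_eq_zero_iff.mp (Nat.le_zero.mp h)
    subst hl
    have hs : PySem.List.sorted ([] : List Int) (fun x => x) false = [] := by
      rw [PySem.List.sorted_eq_nil_iff]
    simp [createPipesLoop, hs]
  | succ fuel ih =>
    intro l mp np h
    by_cases h2 : 1 < l.length
    · -- the loop body runs
      have hlne : l ≠ [] := by intro h0; rw [h0] at h2; simp at h2
      obtain ⟨M, hM⟩ : ∃ M, PySem.List.max? l (fun x => x) = some M := by
        cases hMx : PySem.List.max? l (fun x => x) with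
        | none => exact absurd ((PySem.List.max?_eq_none_iff l _).mp hMx) hlne
        | some M => exact ⟨M, rfl⟩
      have hMmem : M ∈ l := PySem.List.max?_mem hM
      have hMmax : ∀ y ∈ l, y ≤ M := fun y hy => PySem.List.max?_isMax hM y hy
      obtain ⟨maxN, hidx⟩ : ∃ k, PySem.List.index? l M = some k :=
        Option.isSome_iff_exists.mp ((PySem.List.index?_isSome_iff l M).mpr hMmem)
      obtain ⟨hkl, hget, -⟩ := PySem.List.getElem_of_index?_eq_some hidx
      have hpop1 := PySem.List.pop?_natCast l maxN hkl
      set l1 := l.eraseIdx maxN with hl1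
      have hlen1 : l1.length = l.length - 1 := by
        rw [hl1, List.length_eraseIdx, if_pos hkl]
      have hl1ne : l1 ≠ [] := by
        intro hnil; rw [hnil] at hlen1; simp at hlen1; omega
      obtain ⟨m, hm⟩ : ∃ m, PySem.List.min? l1 (fun x => x) = some m := by
        cases hmx : PySem.List.min? l1 (fun x => x) with
        | none => exact absurd ((PySem.List.min?_eq_none_iff l1 _).mp hmx) hl1ne
        | some m => exact ⟨m, rfl⟩
      have hmmem : m ∈ l1 := PySem.List.min?_mem hm
      obtain ⟨minN, hidx2⟩ : ∃ k, PySem.List.index? l1 m = some k :=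
        Option.isSome_iff_exists.mp ((PySem.List.index?_isSome_iff l1 m).mpr hmmem)
      obtain ⟨hkl2, hget2, -⟩ := PySem.List.getElem_of_index?_eq_some hidx2
      have hpop2 := PySem.List.pop?_natCast l1 minN hkl2
      set l2 := l1.eraseIdx minN with hl2
      have hlen2 : l2.length = l.length - 2 := by
        rw [hl2, List.length_eraseIdx, if_pos hkl2, hlen1]; omega
      -- evaluate one loop iteration
      have hstep : createPipesLoop (fuel + 1) l mp np
          = createPipesLoop fuel l2 (mp ++ [M]) (np ++ [m]) := by
        simp only [createPipesLoop, if_pos h2, hM, Option.getD_some, hidx, hpop1, hget,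
          hm, hidx2, hpop2, hget2]
      rw [hstep, ih l2 (mp ++ [M]) (np ++ [m]) (by omega)]
      -- the sorted list of l and its decomposition
      set s := PySem.List.sorted l (fun x => x) false with hs
      have hsl : s.length = l.length := PySem.List.length_sorted l _ false
      have hsperm : s.Perm l := PySem.List.sorted_perm l _ false
      have hsp : s.Pairwise (· ≤ ·) := PySem.List.sorted_pairwise l (fun x => x)
      have hn1lt : l.length - 1 < s.length := by omega
      -- the last element of s is M
      have hlastM : s[l.length-1] = M := by
        refine le_antisymm (hMmax _ (hsperm.mem_iff.mp (List.getElem_mem hn1lt))) ?_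
        obtain ⟨i, hi, hiM⟩ := List.mem_iff_getElem.mp (hsperm.mem_iff.mpr hMmem)
        calc M = s[i] := hiM.symm
          _ ≤ s[l.length-1] := by
              exact PySem.List.sorted_id_getElem_mono l (p := i) (q := l.length-1)
                (by omega) (by rw [PySem.List.length_sorted]; omega)
      set s1 := s.take (l.length-1) with hs1
      have hsdec : s = s1 ++ [M] := by
        have h3 : s.take (l.length-1) ++ [s[l.length-1]] = s.take ((l.length-1)+1) :=
          List.take_append_getElem hn1lt
        rw [hlastM] at h3
        have h4 : (l.length-1)+1 = s.length := by omega
        rw [h4, List.take_length] at h3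
        exact h3.symm
      have hs1len : s1.length = l.length - 1 := by
        rw [hs1, List.length_take]; omega
      have hs1p : s1.Pairwise (· ≤ ·) := hsp.sublist (List.take_sublist _ _)
      -- sorted l1 = s1
      have hperm1 : l1.Perm s1 := by
        have hc1 : (M :: l1).Perm l := by
          rw [hl1, ← hget]; exact List.getElem_cons_eraseIdx_perm hkl
        have hc2 : (M :: s1).Perm s := by
          rw [hsdec]; exact (List.perm_append_singleton M s1).symm
        exact (hc1.trans (hsperm.symm.trans hc2.symm)).cons_inv
      have hsortl1 : PySem.List.sorted l1 (fun x => x) false = s1 :=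
        PySem.List.sorted_id_eq_of_perm_of_pairwise l1 s1 hperm1.symm hs1p
      -- s1 is m followed by its tail
      obtain ⟨a, t, hs1eq⟩ : ∃ a t, s1 = a :: t := by
        cases hc : s1 with
        | nil => rw [hc] at hs1len; simp at hs1len; omega
        | cons a t => exact ⟨a, t, rfl⟩
      have hheadm : a = m := by
        have hmin1 : ∀ y ∈ l1, a ≤ y := by
          intro y hy
          have := PySem.List.key_head_sorted_le (xs := l1) (key := fun x => x)
            (by rw [hsortl1, hs1eq]) y hy
          exact this
        have hamem : a ∈ l1 := hperm1.symm.mem_iff.mp (by rw [hs1eq]; exact List.mem_cons_self)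
        exact le_antisymm (hmin1 m hmmem) (PySem.List.min?_isMin hm a hamem)
      subst hheadm
      -- sorted l2 = t (the tail of s1)
      have hperm2 : l2.Perm t := by
        have hc1 : (a :: l2).Perm l1 := by
          rw [hl2, ← hget2]; exact List.getElem_cons_eraseIdx_perm hkl2
        have hc2 : l1.Perm (a :: t) := by rw [← hs1eq]; exact hperm1
        exact (hc1.trans hc2).cons_inv
      have htp : t.Pairwise (· ≤ ·) := by
        have := hs1p; rw [hs1eq] at this; exact this.tail
      have hsortl2 : PySem.List.sorted l2 (fun x => x) false = t :=
        PySem.List.sorted_id_eq_of_perm_of_pairwise l2 t hperm2.symm htp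
      rw [hsortl2]
      have htlen : t.length = l.length - 2 := by
        have := hs1len; rw [hs1eq] at this; simp at this; omega
      -- final slice arithmetic
      have hk2 : (l2.length + 1) / 2 = (l.length - 1) / 2 := by omega
      have hkk : (l.length + 1) / 2 = (l.length - 1) / 2 + 1 := by omega
      have hkle : (l.length + 1) / 2 ≤ s1.length := by omega
      refine Prod.ext ?_ ?_
      · -- max side
        show mp ++ [M] ++ (t.drop ((l2.length + 1) / 2)).reverse
            = mp ++ (s.drop ((l.length + 1) / 2)).reverse
        rw [hsdec, List.drop_append_of_le_length (by omega), hk2, hkk]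
        have : s1.drop ((l.length - 1) / 2 + 1) = t.drop ((l.length - 1) / 2) := by
          rw [hs1eq, Nat.add_comm, ← List.drop_drop]; rfl
        rw [this, List.reverse_append, List.append_assoc]
        rfl
      · -- min side
        show np ++ [a] ++ t.take ((l2.length + 1) / 2)
            = np ++ s.take ((l.length + 1) / 2)
        rw [hsdec, List.take_append_of_le_length hkle, hk2, hkk, hs1eq,
          List.take_succ_cons, List.append_assoc]
        rfl
    · -- l has length 0 or 1
      rcases l with _ | ⟨x, _ | ⟨y, t⟩⟩
      · have hs : PySem.List.sorted ([] : List Int) (fun x => x) false = [] := by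
          rw [PySem.List.sorted_eq_nil_iff]
        simp [createPipesLoop, hs]
      ·
        have hs : PySem.List.sorted ([x] : List Int) (fun x => x) false = [x] :=
          PySem.List.sorted_id_eq_of_perm_of_pairwise [x] [x] (List.Perm.refl _)
            (List.pairwise_singleton _ _)
        have hpop : PySem.List.pop? ([x] : List Int) (-1) = some (x, []) :=
          PySem.List.pop?_last [] x
        simp [createPipesLoop, hs, hpop]
      · simp at h2

theorem create_pipes_spec : Claim_equal_create_pipes := by
  intro l _
  unfold Spec_create_pipes create_pipes create_pipes_alt
  rw [createPipesLoop_eq l.length l [] [] le_rfl]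
  have hfl : PySem.Int.floordiv (((PySem.List.sorted l (fun x => x) false).length : Int) + 1) 2
      = (((l.length + 1) / 2 : Nat) : Int) := by
    rw [PySem.List.length_sorted]
    exact_mod_cast PySem.Int.floordiv_natCast (l.length + 1) 2
  simp only [hfl, PySem.List.slice_from_natCast, PySem.List.slice_to_natCast, List.nil_append]
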